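-- pv_equiv track=rewrite | github.com/kunal-arya/striver_a2z_dsa_python | Step 1 : Learn the basics/Lec 6: Learn Basic Hashing/03_highest_lowest_frequency_element.py | high_freq_op
-- ===== SOURCE A (Python) =====
-- def high_freq_op(arr, k):
--     # Step 1: Sort the Array
--     arr.sort()
--
--     # Initialize pointers for sliding window
--     l, r = 0, 0
--     max_freq, total = 0, 0
--     n = len(arr)
--
--     # Slide the window
--     while r < n:
--         # Add current element to the total sum
--         total += arr[r]
--
--         # Condition Check:
--         # - arr[r] * window_size > total + k means we need to shrink the window
--         while arr[r] * (r - l + 1) > total + k: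
--             total -= arr[l]
--             l += 1
--
--         # Update maximum frequency
--         max_freq = max(max_freq, r - l + 1)
--         r += 1
--
--     return max_freq
-- ===== SOURCE B (Python) =====
-- def high_freq_op(arr, k):
--     # Sort in place (same observable mutation as the original).
--     arr.sort()
--     n = len(arr)
--
--     # Prefix sums of the sorted array.
--     prefix = [0] * (n + 1)
--     for i in range(n):
--         prefix[i + 1] = prefix[i] + arr[i]
--
--     best = 0
--     for r in range(n):
--         # Binary-search the smallest left endpoint lo in [0, r] whose window
--         # [lo, r] can be equalised to arr[r] within budget k; the cost
--         # arr[r]*(r-lo+1) - sum(arr[lo..r]) is non-increasing in lo.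
--         lo, hi = 0, r
--         while lo < hi:
--             mid = (lo + hi) // 2
--             if arr[r] * (r - mid + 1) - (prefix[r + 1] - prefix[mid]) <= k:
--                 hi = mid
--             else:
--                 lo = mid + 1
--         if arr[r] * (r - lo + 1) - (prefix[r + 1] - prefix[lo]) <= k:
--             best = max(best, r - lo + 1)
--     return best
-- ===== Notes on version B (the rewrite author's own statement) =====
-- stated objective: alternative
-- what changed: Replaces the amortized two-pointer sliding-window sweep by a prefix-sum array plus an independent binary search, for each right endpoint, of the smallest feasible left endpoint.
-- crash fix: On every nonempty arr with k < 0 A's shrink loop walks l past the end of the array and raises IndexError; B returns 0 there (no window of any positive size is affordable with a negative budget). — e.g. on high_freq_op([1], -1): A raises IndexError, B returns 0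
import Mathlib
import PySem

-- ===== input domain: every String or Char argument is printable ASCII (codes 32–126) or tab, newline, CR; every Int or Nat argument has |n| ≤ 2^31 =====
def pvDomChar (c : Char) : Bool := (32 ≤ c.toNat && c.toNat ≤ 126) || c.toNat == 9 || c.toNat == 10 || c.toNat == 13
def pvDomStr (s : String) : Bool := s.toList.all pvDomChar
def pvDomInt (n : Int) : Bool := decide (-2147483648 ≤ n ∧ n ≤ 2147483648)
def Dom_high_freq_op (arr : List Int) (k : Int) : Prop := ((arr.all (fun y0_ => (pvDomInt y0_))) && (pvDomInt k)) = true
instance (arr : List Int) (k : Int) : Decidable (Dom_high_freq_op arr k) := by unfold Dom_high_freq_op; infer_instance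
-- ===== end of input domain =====

-- B replaces A's amortized two-pointer sweep with prefix sums + a binary search per right
-- endpoint (alternative decomposition, not faster). Both A and B sort the argument in place
-- in Python; the equivalence proved here is about the return value.

-- ===== PORT A =====
-- inner `while` loop of A; fuel bounds the iterations (inside Pre_ the loop stops by l = r,
-- so the fuel r+1 passed by aOuter is never exhausted)
def aInner (s : List Int) (k : Int) (r : Nat) : Nat → Nat → Int → Nat × Int
  | 0, l, total => (l, total)
  | fuel+1, l, total =>
    if s.getD r 0 * ((r : Int) - (l : Int) + 1) > total + k then
      aInner s k r fuel (l + 1) (total - s.getD l 0)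
    else (l, total)

-- outer `while r < n` loop of A, state (l, total, max_freq); fuel = n - r counts the
-- remaining iterations
def aOuter (s : List Int) (k : Int) : Nat → Nat → Nat → Int → Int → Int
  | 0, _r, _l, _total, maxf => maxf
  | fuel+1, r, l, total, maxf =>
    let p := aInner s k r (r + 1) l (total + s.getD r 0)
    aOuter s k fuel (r + 1) p.1 p.2 (max maxf ((r : Int) - (p.1 : Int) + 1))

def high_freq_op (arr : List Int) (k : Int) : Int :=
  let s := PySem.List.sorted arr (fun x => x) false
  aOuter s k s.length 0 0 0 0

-- ===== PORT B =====
-- the prefix-sum array built by B's first loop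
def mkPrefix (acc : Int) : List Int → List Int
  | [] => [acc]
  | x :: xs => acc :: mkPrefix (acc + x) xs

-- B's binary search for the smallest feasible left endpoint of a window ending at r
def bSearch (s pre : List Int) (k : Int) (r : Nat) : Nat → Nat → Nat → Nat
  | 0, lo, _ => lo
  | fuel+1, lo, hi =>
    if lo < hi then
      let mid := (lo + hi) / 2
      if s.getD r 0 * ((r : Int) - (mid : Int) + 1) - (pre.getD (r + 1) 0 - pre.getD mid 0) ≤ k then
        bSearch s pre k r fuel lo mid
      else
        bSearch s pre k r fuel (mid + 1) hi
    else lo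

-- B's `for r in range(n)` loop; fuel = n - r counts the remaining iterations
def bOuter (s pre : List Int) (k : Int) : Nat → Nat → Int → Int
  | 0, _r, best => best
  | fuel+1, r, best =>
    let lo := bSearch s pre k r (r + 1) 0 r
    let best' := if s.getD r 0 * ((r : Int) - (lo : Int) + 1) - (pre.getD (r + 1) 0 - pre.getD lo 0) ≤ k
      then max best ((r : Int) - (lo : Int) + 1) else best
    bOuter s pre k fuel (r + 1) best' 

def high_freq_op_alt (arr : List Int) (k : Int) : Int :=
  let s := PySem.List.sorted arr (fun x => x) false
  bOuter s (mkPrefix 0 s) k s.length 0 0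

-- ===== PRECONDITION & SPEC =====
-- Pre_ excludes only inputs on which A raises: on every nonempty arr with k < 0
-- A's shrink loop walks l past the end of the array and raises IndexError.
def Pre_high_freq_op (arr : List Int) (k : Int) : Prop := arr = [] ∨ 0 ≤ k
instance (arr : List Int) (k : Int) : Decidable (Pre_high_freq_op arr k) := by
  unfold Pre_high_freq_op; infer_instance

def pvWitness_high_freq_op : List Int × Int := ([4, 1, 2, 2, 3], 3)

-- On every nonempty arr with k < 0 A raises IndexError; B returns 0 there.
def Raises_high_freq_op (arr : List Int) (k : Int) : Prop := arr ≠ [] ∧ k < 0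
instance (arr : List Int) (k : Int) : Decidable (Raises_high_freq_op arr k) := by
  unfold Raises_high_freq_op; infer_instance
def pvRaiseWitness_high_freq_op : List Int × Int := ([1], -1)
def pvRaiseWitnessOut_high_freq_op : Int := 0

def Spec_high_freq_op (arr : List Int) (k : Int) (out : Int) : Prop := out = high_freq_op_alt arr k
instance (arr : List Int) (k : Int) (out : Int) : Decidable (Spec_high_freq_op arr k out) := by
  unfold Spec_high_freq_op; infer_instance

-- ===== CLAIM (what is proved, stated in full; the proofs are below) =====
def Claim_equal_high_freq_op : Prop := ∀ (arr : List Int) (k : Int), Dom_high_freq_op arr k → Pre_high_freq_op arr k → Spec_high_freq_op arr k (high_freq_op arr k)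

def Claim_raises_high_freq_op : Prop := (∀ (arr : List Int) (k : Int), Dom_high_freq_op arr k → Raises_high_freq_op arr k → ¬ Pre_high_freq_op arr k) ∧ (Dom_high_freq_op (pvRaiseWitness_high_freq_op.1) (pvRaiseWitness_high_freq_op.2) ∧ Raises_high_freq_op (pvRaiseWitness_high_freq_op.1) (pvRaiseWitness_high_freq_op.2) ∧ high_freq_op_alt (pvRaiseWitness_high_freq_op.1) (pvRaiseWitness_high_freq_op.2) = pvRaiseWitnessOut_high_freq_op)

-- ===== LEMMAS AND PROOFS =====

-- sum of the first i elements of s (value of B's prefix[i], and of A's running total)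
def psum (s : List Int) (i : Nat) : Int := (s.take i).sum

-- the window [l, r] of the sorted list s can be equalised to s[r] within budget k
def feas (s : List Int) (k : Int) (r l : Nat) : Prop :=
  s.getD r 0 * ((r : Int) - (l : Int) + 1) - (psum s (r + 1) - psum s l) ≤ k

theorem psum_succ (s : List Int) (i : Nat) (h : i < s.length) :
    psum s (i + 1) = psum s i + s.getD i 0 := by
  unfold psum
  rw [List.take_add_one, List.getElem?_eq_getElem h, List.sum_append,
    List.getD_eq_getElem s 0 h]
  simp

theorem sorted_getD_mono {s : List Int} (hs : s.Pairwise (· ≤ ·)) {i j : Nat}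
    (hij : i ≤ j) (hj : j < s.length) : s.getD i 0 ≤ s.getD j 0 := by
  rcases Nat.lt_or_ge i j with h | h
  · have := (List.pairwise_iff_getElem.mp hs) i j (by omega) hj h
    rw [List.getD_eq_getElem s 0 (by omega), List.getD_eq_getElem s 0 hj]
    exact this
  · have : i = j := by omega
    subst this; rfl

theorem feas_step {s : List Int} {k : Int} {r l : Nat} (hs : s.Pairwise (· ≤ ·))
    (hl : l < r) (hr : r < s.length) (h : feas s k r l) : feas s k r (l + 1) := by
  unfold feas at h ⊢
  have hps := psum_succ s l (by omega)
  have hmono := sorted_getD_mono hs (Nat.le_of_lt hl) hr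
  have hexp : s.getD r 0 * ((r : Int) - (l : Int) + 1)
      = s.getD r 0 * ((r : Int) - (l : Int)) + s.getD r 0 := by ring
  push_cast
  linarith

theorem feas_mono {s : List Int} {k : Int} {r l l' : Nat} (hs : s.Pairwise (· ≤ ·))
    (h1 : l ≤ l') (h2 : l' ≤ r) (hr : r < s.length) (h : feas s k r l) : feas s k r l' := by
  induction l' , h1 using Nat.le_induction with
  | base => exact h
  | succ m hm ih => exact feas_step hs (by omega) hr (ih (by omega))

theorem feas_self {s : List Int} {k : Int} {r : Nat} (hk : 0 ≤ k) (hr : r < s.length) :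
    feas s k r r := by
  unfold feas
  have hps := psum_succ s r hr
  linarith

theorem feas_anti {s : List Int} {k : Int} {r l : Nat} (hs : s.Pairwise (· ≤ ·))
    (hl : l ≤ r) (hr1 : r + 1 < s.length) (h : feas s k (r + 1) l) : feas s k r l := by
  unfold feas at h ⊢
  have hps := psum_succ s (r + 1) hr1
  have hmono := sorted_getD_mono hs (show r ≤ r + 1 by omega) hr1
  have hnn : (0 : Int) ≤ (r : Int) - (l : Int) + 1 := by
    have : (l : Int) ≤ (r : Int) := by exact_mod_cast hl
    linarith
  have hmul : s.getD r 0 * ((r : Int) - (l : Int) + 1)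
      ≤ s.getD (r + 1) 0 * ((r : Int) - (l : Int) + 1) :=
    mul_le_mul_of_nonneg_right hmono hnn
  have hexp : s.getD (r + 1) 0 * (((r : Nat) + 1 : Int) - (l : Int) + 1)
      = s.getD (r + 1) 0 * ((r : Int) - (l : Int) + 1) + s.getD (r + 1) 0 := by ring
  push_cast at h
  linarith [h]

theorem min_unique {s : List Int} {k : Int} {r a b : Nat}
    (ha : feas s k r a) (hamin : ∀ l < a, ¬ feas s k r l)
    (hb : feas s k r b) (hbmin : ∀ l < b, ¬ feas s k r l) : a = b := by
  rcases Nat.lt_trichotomy a b with h | h | h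
  · exact absurd ha (hbmin a h)
  · exact h
  · exact absurd hb (hamin b h)

theorem aInner_spec {s : List Int} {k : Int} {r : Nat}
    (hk : 0 ≤ k) (hr : r < s.length) :
    ∀ fuel l0, l0 ≤ r → r - l0 < fuel →
      ∃ m, aInner s k r fuel l0 (psum s (r + 1) - psum s l0) = (m, psum s (r + 1) - psum s m) ∧
        l0 ≤ m ∧ m ≤ r ∧ feas s k r m ∧ ∀ l, l0 ≤ l → l < m → ¬ feas s k r l := by
  intro fuel
  induction fuel with
  | zero => intro l0 _ h; omega
  | succ fuel ih =>
    intro l0 hl0 hfuel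
    rw [aInner]
    by_cases hC : s.getD r 0 * ((r : Int) - (l0 : Int) + 1) > (psum s (r + 1) - psum s l0) + k
    · rw [if_pos hC]
      have hnf : ¬ feas s k r l0 := by unfold feas; push_cast at hC ⊢; linarith
      have hlt : l0 < r := by
        rcases Nat.lt_or_ge l0 r with h | h
        · exact h
        · exfalso
          have hEq : l0 = r := by omega
          subst hEq
          exact hnf (feas_self hk hr)
      have hps := psum_succ s l0 (by omega)
      have heq : psum s (r + 1) - psum s l0 - s.getD l0 0 = psum s (r + 1) - psum s (l0 + 1) := by
        linarith
      rw [heq]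
      obtain ⟨m, hres, h1, h2, h3, h4⟩ := ih (l0 + 1) (by omega) (by omega)
      exact ⟨m, hres, by omega, h2, h3, fun l hl1 hl2 => by
        rcases Nat.eq_or_lt_of_le hl1 with h | h
        · subst h; exact hnf
        · exact h4 l (by omega) hl2⟩
    · rw [if_neg hC]
      have hf : feas s k r l0 := by unfold feas; push_cast at hC ⊢; linarith
      exact ⟨l0, rfl, le_refl _, hl0, hf, fun l h1 h2 => by omega⟩

theorem mkPrefix_getD (s : List Int) : ∀ (i : Nat) (acc : Int), i ≤ s.length →
    (mkPrefix acc s).getD i 0 = acc + psum s i := by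
  induction s with
  | nil =>
    intro i acc h
    have : i = 0 := by simpa using h
    subst this
    simp [mkPrefix, psum]
  | cons x xs ih =>
    intro i acc h
    cases i with
    | zero => simp [mkPrefix, psum]
    | succ j =>
      simp only [mkPrefix, List.getD_cons_succ]
      rw [ih j (acc + x) (by simpa using h)]
      simp [psum]
      ring

theorem bSearch_spec {s : List Int} {k : Int} {r : Nat} (hs : s.Pairwise (· ≤ ·))
    (hr : r < s.length) :
    ∀ fuel lo hi, lo ≤ hi → hi ≤ r → hi - lo < fuel →
      (∀ l < lo, ¬ feas s k r l) → feas s k r hi →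
      ∃ m, bSearch s (mkPrefix 0 s) k r fuel lo hi = m ∧ m ≤ r ∧ feas s k r m ∧
        ∀ l < m, ¬ feas s k r l := by
  have hcond : ∀ m : Nat, m ≤ r →
      ((s.getD r 0 * ((r : Int) - (m : Int) + 1)
        - ((mkPrefix 0 s).getD (r + 1) 0 - (mkPrefix 0 s).getD m 0) ≤ k) ↔ feas s k r m) := by
    intro m hm
    rw [mkPrefix_getD s (r + 1) 0 (by omega), mkPrefix_getD s m 0 (by omega)]
    unfold feas
    constructor <;> (intro h; linarith)
  intro fuel
  induction fuel with
  | zero => intro lo hi _ _ h; omega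
  | succ fuel ih =>
    intro lo hi hlohi hhir hfuel hinv hfhi
    rw [bSearch]
    by_cases hlt : lo < hi
    · rw [if_pos hlt]
      set mid := (lo + hi) / 2 with hmid
      have hmlo : lo ≤ mid := by omega
      have hmhi : mid < hi := by omega
      by_cases hf : feas s k r mid
      · rw [if_pos ((hcond mid (by omega)).mpr hf)]
        exact ih lo mid hmlo (by omega) (by omega) hinv hf
      · rw [if_neg (fun h => hf ((hcond mid (by omega)).mp h))]
        refine ih (mid + 1) hi (by omega) hhir (by omega) ?_ hfhi
        intro l hl
        rcases Nat.lt_or_ge l lo with h | h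
        · exact hinv l h
        · intro hfl
          exact hf (feas_mono hs (show l ≤ mid by omega) (by omega) hr hfl)
    · rw [if_neg hlt]
      have : lo = hi := by omega
      subst this
      exact ⟨lo, rfl, by omega, hfhi, hinv⟩

theorem outer_eq {s : List Int} {k : Int} (hs : s.Pairwise (· ≤ ·)) (hk : 0 ≤ k) :
    ∀ fuel r l0 m, s.length - r = fuel → l0 ≤ r →
      (r < s.length → ∀ l < l0, ¬ feas s k r l) →
      aOuter s k fuel r l0 (psum s r - psum s l0) m
        = bOuter s (mkPrefix 0 s) k fuel r m := by
  intro fuel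
  induction fuel with
  | zero =>
    intro r l0 m _ _ _
    rfl
  | succ d ih =>
    intro r l0 m hd hl0 hinv
    have hr : r < s.length := by omega
    rw [aOuter, bOuter]
    have hps := psum_succ s r hr
    have htot : psum s r - psum s l0 + s.getD r 0 = psum s (r + 1) - psum s l0 := by linarith
    rw [htot]
    obtain ⟨mA, hresA, hA1, hA2, hA3, hA4⟩ :=
      aInner_spec hk hr (r + 1) l0 hl0 (by omega)
    obtain ⟨mB, hresB, hB1, hB2, hB3⟩ :=
      bSearch_spec hs hr (r + 1) 0 r (by omega) (le_refl r) (by omega)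
        (by omega) (feas_self hk hr)
    have hAmin : ∀ l < mA, ¬ feas s k r l := by
      intro l hl
      rcases Nat.lt_or_ge l l0 with h | h
      · exact hinv hr l h
      · exact hA4 l h hl
    have hmAB : mA = mB := min_unique hA3 hAmin hB2 hB3
    subst hmAB
    rw [hresA, hresB]
    simp only
    rw [if_pos]
    · exact ih (r + 1) mA (max m ((r : Int) - (mA : Int) + 1)) (by omega) (by omega)
        (fun hrn l hl hfl => hAmin l hl (feas_anti hs (by omega) hrn hfl))
    · rw [mkPrefix_getD s (r + 1) 0 (by omega), mkPrefix_getD s mA 0 (by omega)]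
      unfold feas at hA3
      linarith

-- ===== VERDICT (by name: the statement is the Claim_ definition above) =====
theorem high_freq_op_spec : Claim_equal_high_freq_op := by
  intro arr k _ hpre
  unfold Spec_high_freq_op high_freq_op high_freq_op_alt
  rcases hpre with h | hk
  · subst h
    rfl
  · have hs := PySem.List.sorted_pairwise (κ := Int) (xs := arr) (key := fun x => x)
    exact outer_eq (by simpa using hs) hk
      (PySem.List.sorted arr (fun x => x) false).length 0 0 0 rfl (by omega)
      (fun _ l hl => by omega)

@[simp]
theorem high_freq_op_raises : Claim_raises_high_freq_op := by
  unfold Claim_raises_high_freq_op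
  constructor
  · intro arr k _ hr hp
    unfold Raises_high_freq_op at hr
    unfold Pre_high_freq_op at hp
    rcases hp with h | h
    · exact hr.1 h
    · omega
  · exact ⟨by decide, by decide, by decide⟩
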